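-- pv_equiv track=rewrite | github.com/tysjosh/job-matching-contrastive-learning | augmentation/progression_constraints.py | _find_connected_occupations
-- ===== SOURCE A (Python) =====
-- from typing import Dict, Any, Optional, Set, List
--
-- def _find_connected_occupations(start_uri: str, pathways: Dict, visited: set) -> List[str]:
--     """Find all occupations connected to the starting occupation"""
--     if start_uri in visited:
--         return []
--
--     connected = [start_uri]
--     visited.add(start_uri)
--     queue = [start_uri]
--
--     while queue:
--         current = queue.pop(0)
--
--         # Forward connections
--         for target in pathways.get(current, []):
--             if target not in visited:
--                 visited.add(target)
--                 connected.append(target)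
--                 queue.append(target)
--
--         # Backward connections
--         for uri, targets in pathways.items():
--             if current in targets and uri not in visited:
--                 visited.add(uri)
--                 connected.append(uri)
--                 queue.append(uri)
--
--     return connected
-- ===== SOURCE B (Python) =====
-- from typing import Dict, List
--
-- def _find_connected_occupations(start_uri: str, pathways: Dict, visited: set) -> List[str]:
--     """Find all occupations connected to the starting occupation (BFS with a
--     precomputed reverse-adjacency map and a deque; also mutates `visited` like the original)."""
--     if start_uri in visited:
--         return []
--
--     # Build the reverse adjacency map once: rev[t] = keys (in dict order) whose
--     # target lists contain t (each key at most once per target value).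
--     rev = {}
--     for uri, targets in pathways.items():
--         for t in dict.fromkeys(targets):
--             rev.setdefault(t, []).append(uri)
--
--     connected = [start_uri]
--     visited.add(start_uri)
--     from collections import deque
--     queue = deque([start_uri])
--     while queue:
--         current = queue.popleft()
--         for node in pathways.get(current, []) + rev.get(current, []):
--             if node not in visited:
--                 visited.add(node)
--                 connected.append(node)
--                 queue.append(node)
--     return connected
-- ===== Notes on version B (the rewrite author's own statement) =====
-- stated objective: alternative
-- what changed: B precomputes a reverse-adjacency map once and runs BFS with a deque over forward+reverse neighbour lists, instead of rescanning all pathway items for backward edges at every dequeued node and popping from the front of a list.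
import Mathlib
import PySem

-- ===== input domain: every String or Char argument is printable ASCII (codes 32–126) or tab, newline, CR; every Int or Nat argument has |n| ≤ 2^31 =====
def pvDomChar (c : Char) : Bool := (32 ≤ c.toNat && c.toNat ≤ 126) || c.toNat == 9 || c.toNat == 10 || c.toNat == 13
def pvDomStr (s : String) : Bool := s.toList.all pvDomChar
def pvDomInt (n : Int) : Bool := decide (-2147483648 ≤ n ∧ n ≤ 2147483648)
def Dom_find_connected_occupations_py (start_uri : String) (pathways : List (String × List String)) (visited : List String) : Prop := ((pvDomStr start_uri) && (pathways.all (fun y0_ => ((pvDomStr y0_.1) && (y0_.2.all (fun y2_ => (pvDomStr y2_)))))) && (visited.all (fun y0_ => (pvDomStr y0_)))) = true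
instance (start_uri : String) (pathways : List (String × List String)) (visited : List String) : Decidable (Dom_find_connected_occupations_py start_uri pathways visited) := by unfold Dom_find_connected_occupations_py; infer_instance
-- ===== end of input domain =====

-- B does BFS over a reverse-adjacency map precomputed once, instead of rescanning all
-- pathway items per dequeued node; both mutate `visited` identically in Python, and the
-- theorem is about the return value.


-- state = (visited, connected, queue); pvVisit is the shared Python fragment
-- "if x not in visited: visited.add(x); connected.append(x); queue.append(x)"
def pvVisit (st : List String × List String × List String) (x : String) :
    List String × List String × List String :=
  if x ∈ st.1 then st else (PySem.Set.add st.1 x, st.2.1 ++ [x], st.2.2 ++ [x])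

-- ===== PORT A =====
-- A's while loop: pop(0), forward targets, then a scan of ALL pathway items for backward
-- edges.  Fuel bounds the number of pops (≤ 1 + #keys + Σ|targets|, since each pop was a
-- visited-gated enqueue); it is never exhausted on a real run.
def pvLoopA (pathways : List (String × List String)) :
    Nat → List String × List String × List String → List String
  | 0, st => st.2.1
  | f + 1, st =>
    match st.2.2 with
    | [] => st.2.1
    | cur :: rest =>
      let s1 := ((PySem.Dict.mk pathways).getD cur []).foldl pvVisit (st.1, st.2.1, rest)
      let s2 := pathways.foldl
        (fun s p => if cur ∈ p.2 ∧ p.1 ∉ s.1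
          then (PySem.Set.add s.1 p.1, s.2.1 ++ [p.1], s.2.2 ++ [p.1]) else s) s1
      pvLoopA pathways f s2

def find_connected_occupations_py (start_uri : String) (pathways : List (String × List String)) (visited : List String) : List String :=
  if start_uri ∈ visited then []
  else
    pvLoopA pathways (pathways.length + (pathways.map (fun p => p.2.length)).sum + 1)
      (PySem.Set.add visited start_uri, [start_uri], [start_uri])

-- ===== PORT B =====
-- rev[t] = keys (in dict order) whose target list contains t, built once
-- (`for t in dict.fromkeys(targets): rev.setdefault(t, []).append(uri)`).
def pvRev (pathways : List (String × List String)) : PySem.Dict String (List String) :=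
  pathways.foldl
    (fun d p => (PySem.List.dedup p.2).foldl (fun d t => d.modify t [] (· ++ [p.1])) d)
    PySem.Dict.empty

-- B's while loop: popleft, then one pass over pathways.get(cur,[]) + rev.get(cur,[]).
def pvLoopB (fwd rev : PySem.Dict String (List String)) :
    Nat → List String × List String × List String → List String
  | 0, st => st.2.1
  | f + 1, st =>
    match st.2.2 with
    | [] => st.2.1
    | cur :: rest =>
      pvLoopB fwd rev f
        ((fwd.getD cur [] ++ rev.getD cur []).foldl pvVisit (st.1, st.2.1, rest))

def find_connected_occupations_py_alt (start_uri : String) (pathways : List (String × List String)) (visited : List String) : List String :=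
  if start_uri ∈ visited then []
  else
    pvLoopB (PySem.Dict.mk pathways) (pvRev pathways)
      (pathways.length + (pathways.map (fun p => p.2.length)).sum + 1)
      (PySem.Set.add visited start_uri, [start_uri], [start_uri])

-- ===== PRECONDITION & SPEC =====
def Spec_find_connected_occupations_py (start_uri : String) (pathways : List (String × List String)) (visited : List String) (out : List String) : Prop := out = find_connected_occupations_py_alt start_uri pathways visited
instance (start_uri : String) (pathways : List (String × List String)) (visited : List String) (out : List String) : Decidable (Spec_find_connected_occupations_py start_uri pathways visited out) := by unfold Spec_find_connected_occupations_py; infer_instance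

-- ===== CLAIM (what is proved, stated in full; the proofs are below) =====
def Claim_equal_find_connected_occupations_py : Prop := ∀ (start_uri : String) (pathways : List (String × List String)) (visited : List String), Dom_find_connected_occupations_py start_uri pathways visited → Spec_find_connected_occupations_py start_uri pathways visited (find_connected_occupations_py start_uri pathways visited)

-- ===== LEMMAS AND PROOFS =====

-- a Nodup list filtered for equality with c is [c] or []
theorem pv_filter_nodup (c : String) :
    ∀ l : List String, l.Nodup → l.filter (fun x => x == c) = if c ∈ l then [c] else [] := by
  intro l hl
  induction l with
  | nil => simp
  | cons a tl ih =>
    simp only [List.nodup_cons] at hl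
    rw [List.filter_cons]
    by_cases hac : a = c
    · subst hac
      have h0 : tl.filter (fun x => x == a) = [] := by
        rw [ih hl.2]; simp [hl.1]
      simp [h0]
    · simp only [beq_iff_eq, hac, if_false, ih hl.2, List.mem_cons]
      have hca : ¬ c = a := fun h => hac h.symm
      simp [hca]

-- the reverse map looked up at cur is exactly the keys whose target list contains cur
theorem pv_rev_getD (cur : String) :
    ∀ (l : List (String × List String)) (d : PySem.Dict String (List String)),
      (l.foldl (fun d p => (PySem.List.dedup p.2).foldl
          (fun d t => d.modify t [] (· ++ [p.1])) d) d).getD cur []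
        = d.getD cur [] ++ (l.filter (fun p => decide (cur ∈ p.2))).map (·.1) := by
  intro l
  induction l with
  | nil => simp
  | cons p tl ih =>
    intro d
    simp only [List.foldl_cons, ih]
    have hinner : ((PySem.List.dedup p.2).foldl
        (fun d t => d.modify t [] (· ++ [p.1])) d).getD cur []
        = d.getD cur [] ++ (if cur ∈ p.2 then [p.1] else []) := by
      have hmap : (PySem.List.dedup p.2).foldl (fun d t => d.modify t [] (· ++ [p.1])) d
          = ((PySem.List.dedup p.2).map (fun t => (t, p.1))).foldl
              (fun d q => d.modify q.1 [] (· ++ [q.2])) d := by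
        rw [List.foldl_map]
      rw [hmap, PySem.Dict.getD_foldl_modify_append]
      congr 1
      rw [List.filter_map]
      have : ((PySem.List.dedup p.2).filter ((fun q => q.1 == cur) ∘ (fun t => (t, p.1))))
          = (PySem.List.dedup p.2).filter (fun t => t == cur) := by rfl
      rw [this, pv_filter_nodup cur _ (PySem.List.nodup_dedup p.2)]
      by_cases h : cur ∈ p.2 <;> simp [h]
    rw [hinner, List.filter_cons]
    by_cases h : cur ∈ p.2 <;> simp [h, List.append_assoc]

-- A's backward scan over all items = a pvVisit pass over the matching keys
theorem pv_backscan (cur : String) :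
    ∀ (l : List (String × List String)) (s : List String × List String × List String),
      l.foldl (fun s p => if cur ∈ p.2 ∧ p.1 ∉ s.1
          then (PySem.Set.add s.1 p.1, s.2.1 ++ [p.1], s.2.2 ++ [p.1]) else s) s
        = ((l.filter (fun p => decide (cur ∈ p.2))).map (·.1)).foldl pvVisit s := by
  intro l
  induction l with
  | nil => intro s; rfl
  | cons p tl ih =>
    intro s
    simp only [List.foldl_cons, List.filter_cons]
    by_cases h : cur ∈ p.2
    · have hstep : (if cur ∈ p.2 ∧ p.1 ∉ s.1
          then (PySem.Set.add s.1 p.1, s.2.1 ++ [p.1], s.2.2 ++ [p.1]) else s)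
          = pvVisit s p.1 := by
        unfold pvVisit
        by_cases hm : p.1 ∈ s.1 <;> simp [h, hm]
      rw [hstep]
      simp only [h, decide_true, if_true, List.map_cons, List.foldl_cons, ih]
    · simp only [h, decide_false, ih]
      simp [h]

-- the two loops agree step for step
theorem pv_loop_eq (pathways : List (String × List String)) :
    ∀ (f : Nat) (st : List String × List String × List String),
      pvLoopA pathways f st = pvLoopB (PySem.Dict.mk pathways) (pvRev pathways) f st := by
  intro f
  induction f with
  | zero => intro st; rfl
  | succ f ih =>
    intro st
    match hq : st.2.2 with
    | [] => simp [pvLoopA, pvLoopB, hq]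
    | cur :: rest =>
      simp only [pvLoopA, pvLoopB, hq]
      rw [List.foldl_append, ih]
      congr 1
      rw [pvRev, pv_rev_getD]
      simp only [PySem.Dict.getD_empty, List.nil_append]
      rw [pv_backscan]

-- ===== VERDICT (by name: the statement is the Claim_ definition above) =====
theorem find_connected_occupations_py_spec : Claim_equal_find_connected_occupations_py := by
  intro start_uri pathways visited _
  unfold Spec_find_connected_occupations_py find_connected_occupations_py
    find_connected_occupations_py_alt
  by_cases h : start_uri ∈ visited
  · simp [h]
  · simp only [h, if_false]
    exact pv_loop_eq pathways _ _
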